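-- pv_equiv track=rewrite | github.com/UltraFastQ/femtoQ-Intruments | Labo_Env/ultrafastGUI/pipython/pidevice/gcs2/gcs2datarectools.py | __isabbreviation
-- ===== SOURCE A (Python) =====
-- def __isabbreviation(abbrev, item):
--     """Return True if first char of 'abbrev' and 'item' match and all chars of 'abbrev' occur in 'item' in this order.
--     @param abbrev : Case sensitive string.
--     @param item : Case sensitive string.
--     @return : True if 'abbrev' is an abbreviation of 'item'.
--     """
--     if not abbrev:
--         return True
--     if not item:
--         return False
--     if abbrev[0] != item[0]:
--         return False
--     return any(__isabbreviation(abbrev[1:], item[i + 1:]) for i in range(len(item)))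
-- ===== SOURCE B (Python) =====
-- def __isabbreviation(abbrev, item):
--     """Return True if first char of 'abbrev' and 'item' match and all chars of 'abbrev' occur in 'item' in this order."""
--     if not abbrev:
--         return True
--     if not item or abbrev[0] != item[0]:
--         return False
--     i, j = 1, 1
--     while i < len(abbrev) and j < len(item):
--         if abbrev[i] == item[j]:
--             i += 1
--         j += 1
--     return i == len(abbrev)
-- ===== Notes on version B (the rewrite author's own statement) =====
-- stated objective: faster
-- what changed: Replaced the exponential recursion that tries every suffix of item at every step with a single greedy two-pointer subsequence scan after the first-char check.
import Mathlib
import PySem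

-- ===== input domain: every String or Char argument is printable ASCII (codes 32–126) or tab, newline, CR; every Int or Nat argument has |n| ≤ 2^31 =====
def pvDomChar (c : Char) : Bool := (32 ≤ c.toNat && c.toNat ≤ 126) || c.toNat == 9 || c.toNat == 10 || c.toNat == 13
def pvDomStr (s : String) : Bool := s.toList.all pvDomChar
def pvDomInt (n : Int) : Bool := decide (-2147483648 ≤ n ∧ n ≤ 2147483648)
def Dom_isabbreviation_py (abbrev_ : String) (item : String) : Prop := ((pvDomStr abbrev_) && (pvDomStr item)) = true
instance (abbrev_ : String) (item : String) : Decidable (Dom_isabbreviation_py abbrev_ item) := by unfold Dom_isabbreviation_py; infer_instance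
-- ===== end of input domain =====

-- B replaces A's exponential try-every-suffix recursion with a linear greedy two-pointer subsequence scan (same return value).


-- ===== PORT A =====
-- literal transliteration of A's recursion: empty abbrev → True, empty item → False,
-- first chars differ → False, else `any` over i in range(len(item)) of the recursive
-- call on (abbrev[1:], item[i+1:]).
def isabAuxA : List Char → List Char → Bool
  | [], _ => true
  | _ :: _, [] => false
  | a :: as, b :: bs =>
    if a != b then false
    else (List.range ((b :: bs).length)).any (fun i => isabAuxA as ((b :: bs).drop (i + 1)))

def isabbreviation_py (abbrev_ : String) (item : String) : Bool :=
  isabAuxA abbrev_.toList item.toList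

-- ===== PORT B =====
-- greedy two-pointer loop of Source B: walk both remainders; on a match advance the
-- abbrev pointer; always advance the item pointer; succeed iff abbrev is exhausted.
def subScan : List Char → List Char → Bool
  | [], _ => true
  | _ :: _, [] => false
  | a :: as, b :: bs => if a == b then subScan as bs else subScan (a :: as) bs

def isabbreviation_py_alt (abbrev_ : String) (item : String) : Bool :=
  match abbrev_.toList, item.toList with
  | [], _ => true
  | _ :: _, [] => false
  | a :: as, b :: bs => if a != b then false else subScan as bs

-- ===== PRECONDITION & SPEC =====
def Spec_isabbreviation_py (abbrev_ : String) (item : String) (out : Bool) : Prop := out = isabbreviation_py_alt abbrev_ item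
instance (abbrev_ : String) (item : String) (out : Bool) : Decidable (Spec_isabbreviation_py abbrev_ item out) := by unfold Spec_isabbreviation_py; infer_instance

-- ===== CLAIM (what is proved, stated in full; the proofs are below) =====
def Claim_equal_isabbreviation_py : Prop := ∀ (abbrev_ : String) (item : String), Dom_isabbreviation_py abbrev_ item → Spec_isabbreviation_py abbrev_ item (isabbreviation_py abbrev_ item)

-- ===== LEMMAS AND PROOFS =====

-- dropping the head of the abbreviation preserves a greedy-scan success
theorem subScan_tail : ∀ (bs : List Char) (a : Char) (as : List Char),
    subScan (a :: as) bs = true → subScan as bs = true := by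
  intro bs
  induction bs with
  | nil => intro a as h; simp [subScan] at h
  | cons b bs ih =>
    intro a as h
    by_cases hab : a = b
    · -- greedy matched a with b; hypothesis is subScan as bs
      simp [subScan, hab] at h
      cases as with
      | nil => simp [subScan]
      | cons a' as' =>
        by_cases h2 : a' = b
        · simpa [subScan, h2] using ih a' as' (by simpa [h2] using h)
        · simpa [subScan, h2] using h
    · simp [subScan, hab] at h
      have h' := ih a as h
      cases as with
      | nil => simp [subScan]
      | cons a' as' =>
        by_cases h2 : a' = b
        · simpa [subScan, h2] using ih a' as' (by simpa [h2] using h')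
        · simpa [subScan, h2] using h'

-- A's `any` over all suffixes of the item equals the greedy scan
theorem anyDrop_eq_subScan : ∀ (as : List Char) (bs : List Char),
    (List.range (bs.length + 1)).any (fun i => isabAuxA as (bs.drop i)) = subScan as bs := by
  intro as
  induction as with
  | nil =>
    intro bs
    simp [isabAuxA, subScan, List.range_succ]
  | cons a as iha =>
    intro bs
    induction bs with
    | nil => simp [isabAuxA, subScan]
    | cons b bs ihb =>
      have hshift : (List.range (bs.length + 1)).any
          (fun i => isabAuxA (a :: as) ((b :: bs).drop (i + 1)))
          = subScan (a :: as) bs := by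
        simpa using ihb
      have hsplit : (List.range ((b :: bs).length + 1)).any
            (fun i => isabAuxA (a :: as) ((b :: bs).drop i))
          = (isabAuxA (a :: as) (b :: bs)
             || (List.range (bs.length + 1)).any
                  (fun i => isabAuxA (a :: as) ((b :: bs).drop (i + 1)))) := by
        rw [List.range_succ_eq_map]
        simp [List.any_map, Function.comp_def]
      rw [hsplit, hshift]
      by_cases hab : a = b
      · have hhead : isabAuxA (a :: as) (b :: bs) = subScan as bs := by
          simp only [isabAuxA, hab]
          simpa using iha bs
        rw [hhead]
        cases h1 : subScan as bs with
        | true => simp [subScan, hab, h1]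
        | false =>
          cases h2 : subScan (a :: as) bs with
          | true =>
            have := subScan_tail bs a as h2
            rw [h1] at this; cases this
          | false => simp [subScan, hab, h1]
      · have hhead : isabAuxA (a :: as) (b :: bs) = false := by
          simp [isabAuxA, hab]
        rw [hhead]
        simp [subScan, hab]

-- ===== VERDICT (by name: the statement is the Claim_ definition above) =====
theorem isabbreviation_py_spec : Claim_equal_isabbreviation_py := by
  intro abbrev_ item _
  unfold Spec_isabbreviation_py isabbreviation_py isabbreviation_py_alt
  cases habs : abbrev_.toList with
  | nil => simp [isabAuxA]
  | cons a as =>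
    cases hit : item.toList with
    | nil => simp [isabAuxA]
    | cons b bs =>
      by_cases hab : a = b
      · simp only [isabAuxA, hab, bne_self_eq_false, Bool.false_eq_true, if_false]
        simpa using anyDrop_eq_subScan as bs
      · simp [isabAuxA, hab]
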